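-- pv_equiv track=rewrite | github.com/tgyuuAn/Algorithm | Bracket_python.py | solution
-- ===== SOURCE A (Python) =====
-- def solution(s):
--     n = len(s)
--     answer = 0
--
--     for x in range(n):
--         temp = []
--         for y in range(x,x+n):
--             z = y%n
--             word = s[z]
--             temp.append(word)
--
--             if len(temp) >= 2:
--                 if (temp[-2] == "(" and temp[-1] == ")") or (temp[-2] == "[" and temp[-1] == "]") or (temp[-2] == "{" and temp[-1] == "}"):
--                     temp.pop()
--                     temp.pop()
--
--         if len(temp) == 0:
--             answer += 1
--     return answer
-- ===== SOURCE B (Python) =====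
-- def solution(s):
--     # No stack: each rotation is reduced to a fixpoint by global pair-deletion replaces.
--     n = len(s)
--     doubled = s + s
--     answer = 0
--     for x in range(n):
--         r = doubled[x:x + n]
--         while True:
--             r2 = r.replace('()', '').replace('[]', '').replace('{}', '')
--             if r2 == r:
--                 break
--             r = r2
--         if r == '':
--             answer += 1
--     return answer
-- ===== Notes on version B (the rewrite author's own statement) =====
-- stated objective: alternative
-- what changed: A scans each rotation once with an explicit stack (append char, pop when the top two match); B takes each rotation as a slice of s+s and, with no stack at all, shrinks it to a fixpoint of the three global pair-deleting str.replace calls, counting the rotation when the fixpoint is empty (bracket-pair deletion is confluent, so the fixpoint is empty exactly when A's stack ends empty).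
import Mathlib
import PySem

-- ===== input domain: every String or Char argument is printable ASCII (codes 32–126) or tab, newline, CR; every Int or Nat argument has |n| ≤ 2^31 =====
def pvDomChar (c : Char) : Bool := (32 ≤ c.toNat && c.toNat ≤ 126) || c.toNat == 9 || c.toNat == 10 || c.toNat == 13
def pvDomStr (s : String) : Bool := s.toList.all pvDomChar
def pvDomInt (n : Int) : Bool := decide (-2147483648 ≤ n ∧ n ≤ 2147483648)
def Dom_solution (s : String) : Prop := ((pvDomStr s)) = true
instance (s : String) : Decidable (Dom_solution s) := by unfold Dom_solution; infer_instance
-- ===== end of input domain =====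

-- B replaces A's explicit per-rotation stack scan by reducing each rotation (a slice of s+s)
-- to a fixpoint of the three pair-deleting str.replace calls (no stack); same return value on
-- every input; a timing run measured B much faster (C-level replace vs per-char Python loop).

-- ===== PORT A =====
-- A's inner-loop body: temp.append(word), then pop the last two entries when temp[-2], temp[-1] form a matched pair
def stepA (temp : List Char) (word : Char) : List Char :=
  let t := temp ++ [word]
  if 2 ≤ t.length then
    if (PySem.List.pyGetD t (-2) ' ' == '(' && PySem.List.pyGetD t (-1) ' ' == ')')
       || (PySem.List.pyGetD t (-2) ' ' == '[' && PySem.List.pyGetD t (-1) ' ' == ']')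
       || (PySem.List.pyGetD t (-2) ' ' == '{' && PySem.List.pyGetD t (-1) ' ' == '}') then
      t.dropLast.dropLast
    else t
  else t

def solution (s : String) : Int :=
  let cs := s.toList
  let n : Int := PySem.Str.len s
  (PySem.List.pyRange 0 n 1).foldl (fun answer x =>
    let temp : List Char :=
      (PySem.List.pyRange x (x + n) 1).foldl (fun temp y =>
        stepA temp (PySem.List.pyGetD cs (PySem.Int.mod y n) ' ')) []
    if temp.length = 0 then answer + 1 else answer) 0
-- ===== PORT B =====
-- one pass r.replace('()','').replace('[]','').replace('{}','')
def reducePassB (r : List Char) : List Char :=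
  PySem.Chars.replace (PySem.Chars.replace (PySem.Chars.replace r ['(', ')'] []) ['[', ']'] []) ['{', '}'] []

-- the 'while True' loop of Source B; fuel is only a totality guard (each non-final pass shortens r)
def fixLoopB : Nat → List Char → List Char
  | 0, r => r
  | fuel + 1, r =>
    let r2 := reducePassB r
    if r2 = r then r else fixLoopB fuel r2

def solution_alt (s : String) : Int :=
  let cs := s.toList
  let n : Int := PySem.Str.len s
  let doubled := cs ++ cs
  (PySem.List.pyRange 0 n 1).foldl (fun answer x =>
    let r := PySem.List.slice doubled (some x) (some (x + n))
    let rfix := fixLoopB (r.length + 1) r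
    if rfix = [] then answer + 1 else answer) 0
-- ===== PRECONDITION & SPEC =====
def Spec_solution (s : String) (out : Int) : Prop := out = solution_alt s
instance (s : String) (out : Int) : Decidable (Spec_solution s out) := by unfold Spec_solution; infer_instance

-- ===== CLAIM (what is proved, stated in full; the proofs are below) =====
def Claim_equal_solution : Prop := ∀ (s : String), Dom_solution s → Spec_solution s (solution s)

-- ===== LEMMAS AND PROOFS =====

def isPairB (a b : Char) : Bool :=
  (a == '(' && b == ')') || (a == '[' && b == ']') || (a == '{' && b == '}')

def stepS (st : List Char) (c : Char) : List Char :=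
  match st with
  | [] => [c]
  | a :: st' => if isPairB a c then st' else c :: a :: st'

def rem2 (a b : Char) : List Char → List Char
  | c :: d :: t => if c == a && d == b then rem2 a b t else c :: rem2 a b (d :: t)
  | l => l

theorem rem2_short (a b : Char) (l : List Char)
    (h1 : ∀ (c d : Char) (t : List Char), l = c :: d :: t → False) : rem2 a b l = l := by
  match l with
  | [] => rfl
  | [c] => rfl
  | c :: d :: t => exact (h1 c d t rfl).elim

theorem rem2_len (a b : Char) (l : List Char) : (rem2 a b l).length ≤ l.length := by
  induction l using rem2.induct a b with
  | case1 c d t hcd ih => simp only [rem2, hcd, if_true]; simp; omega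
  | case2 c d t hcd ih => simp only [rem2, hcd, Bool.false_eq_true, if_false]; simp at ih ⊢; omega
  | case3 l h1 => rw [rem2_short a b l h1]

theorem rem2_eq_or_lt (a b : Char) (l : List Char) :
    rem2 a b l = l ∨ (rem2 a b l).length < l.length := by
  induction l using rem2.induct a b with
  | case1 c d t hcd ih =>
    right
    have := rem2_len a b t
    simp only [rem2, hcd, if_true]; simp; omega
  | case2 c d t hcd ih =>
    simp only [rem2, hcd, Bool.false_eq_true, if_false]
    rcases ih with h | h
    · left; rw [h]
    · right; simp at h ⊢; omega
  | case3 l h1 => left; exact rem2_short a b l h1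

theorem isPairB_fst_not_snd {a b : Char} (h : isPairB a b = true) (x : Char) :
    isPairB x a = false := by
  simp only [isPairB, Bool.or_eq_true, Bool.and_eq_true, beq_iff_eq] at h
  rcases h with (⟨ha, hb⟩ | ⟨ha, hb⟩) | ⟨ha, hb⟩
  all_goals (subst ha; simp [isPairB])

theorem foldl_stepS_pair {a b : Char} (h : isPairB a b = true) (v : List Char) (st : List Char) :
    List.foldl stepS st (a :: b :: v) = List.foldl stepS st v := by
  have h1 : stepS st a = a :: st := by
    cases st with
    | nil => rfl
    | cons x st' => simp [stepS, isPairB_fst_not_snd h x]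
  have h2 : stepS (a :: st) b = st := by simp [stepS, h]
  simp [List.foldl, h1, h2]

theorem foldl_stepS_rem2 {a b : Char} (h : isPairB a b = true) (l : List Char) (st : List Char) :
    List.foldl stepS st (rem2 a b l) = List.foldl stepS st l := by
  induction l using rem2.induct a b generalizing st with
  | case1 c d t hcd ih =>
    simp only [Bool.and_eq_true, beq_iff_eq] at hcd
    obtain ⟨rfl, rfl⟩ := hcd
    simp only [rem2, BEq.rfl, Bool.and_self, if_true]
    rw [ih, foldl_stepS_pair h]
  | case2 c d t hcd ih =>
    simp only [rem2, hcd, Bool.false_eq_true, if_false]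
    simp only [List.foldl_cons]
    exact ih _
  | case3 l h1 => rw [rem2_short a b l h1]

theorem go_succ_cons (old new : List Char) (fuel : Nat) (c : Char) (t acc : List Char) :
    PySem.Chars.replace.go old new (fuel+1) (c :: t) acc =
      if old.isPrefixOf (c :: t) then
        PySem.Chars.replace.go old new fuel (List.drop old.length (c :: t)) (new.reverse ++ acc)
      else PySem.Chars.replace.go old new fuel t (c :: acc) := by
  rw [PySem.Chars.replace.go.eq_def]

theorem go_nil (old new : List Char) (fuel : Nat) (acc : List Char) :
    PySem.Chars.replace.go old new fuel [] acc = acc.reverse := by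
  rw [PySem.Chars.replace.go.eq_def]; cases fuel <;> simp

theorem replace_go_rem2 (a b : Char) (fuel : Nat) (l acc : List Char) (h : l.length ≤ fuel) :
    PySem.Chars.replace.go [a, b] [] fuel l acc = acc.reverse ++ rem2 a b l := by
  induction fuel generalizing l acc with
  | zero =>
    have hl : l = [] := by
      cases l with
      | nil => rfl
      | cons c t => simp at h
    subst hl
    rw [go_nil]; simp [rem2]
  | succ fuel ih =>
    match l with
    | [] => rw [go_nil]; simp [rem2]
    | [c] =>
      rw [go_succ_cons]
      have hp : ([a,b].isPrefixOf [c]) = false := by simp [List.isPrefixOf]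
      rw [hp]
      simp only [Bool.false_eq_true, if_false]
      rw [ih [] (c :: acc) (by simp)]
      simp [rem2]
    | c :: d :: t =>
      simp only [List.length_cons] at h
      by_cases hp : c = a ∧ d = b
      · obtain ⟨rfl, rfl⟩ := hp
        rw [go_succ_cons]
        have hpre : ([c,d].isPrefixOf (c :: d :: t)) = true := by simp [List.isPrefixOf]
        rw [hpre]
        simp only [if_true, List.length_cons, List.drop_succ_cons, List.length_nil, List.drop_zero,
          List.reverse_nil, List.nil_append]
        rw [ih t acc (by omega)]
        simp [rem2]
      · rw [go_succ_cons]
        have hpre : ([a,b].isPrefixOf (c :: d :: t)) = false := by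
          simp [List.isPrefixOf]; intro h1 h2; exact absurd ⟨h1.symm, h2.symm⟩ hp
        rw [hpre]
        simp only [Bool.false_eq_true, if_false]
        rw [ih (d :: t) (c :: acc) (by simp; omega)]
        have hcd : (c == a && d == b) = false := by
          simp; intro h1 h2; exact absurd ⟨h1, h2⟩ hp
        simp [rem2, hcd]

theorem replace_rem2 (a b : Char) (l : List Char) :
    PySem.Chars.replace l [a, b] [] = rem2 a b l := by
  rw [PySem.Chars.replace]
  simp only [List.isEmpty, Bool.false_eq_true, if_false]
  rw [replace_go_rem2 a b l.length l [] le_rfl]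
  simp

def redS (w : List Char) : List Char := w.foldl stepS []

theorem reducePassB_rem2 (r : List Char) :
    reducePassB r = rem2 '{' '}' (rem2 '[' ']' (rem2 '(' ')' r)) := by
  simp [reducePassB, replace_rem2]

theorem redS_pass (r : List Char) : redS (reducePassB r) = redS r := by
  rw [reducePassB_rem2]
  unfold redS
  rw [foldl_stepS_rem2 (by decide), foldl_stepS_rem2 (by decide), foldl_stepS_rem2 (by decide)]

theorem pass_ne_lt (r : List Char) (h : reducePassB r ≠ r) :
    (reducePassB r).length < r.length := by
  rw [reducePassB_rem2] at h ⊢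
  rcases rem2_eq_or_lt '(' ')' r with h1 | h1 <;>
  rcases rem2_eq_or_lt '[' ']' (rem2 '(' ')' r) with h2 | h2 <;>
  rcases rem2_eq_or_lt '{' '}' (rem2 '[' ']' (rem2 '(' ')' r)) with h3 | h3 <;>
    first
      | (exfalso; apply h; rw [h3, h2, h1])
      | (have a1 := rem2_len '(' ')' r
         have a2 := rem2_len '[' ']' (rem2 '(' ')' r)
         have a3 := rem2_len '{' '}' (rem2 '[' ']' (rem2 '(' ')' r))
         omega)

theorem rem2_fix_chain (a b : Char) (l : List Char) (h : rem2 a b l = l) :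
    List.IsChain (fun c d => ¬(c = a ∧ d = b)) l := by
  induction l using rem2.induct a b with
  | case1 c d t hcd ih =>
    exfalso
    have hlen := rem2_len a b t
    simp only [rem2, hcd, if_true] at h
    rw [h] at hlen; simp at hlen
  | case2 c d t hcd ih =>
    simp only [rem2, hcd, Bool.false_eq_true, if_false, List.cons.injEq, true_and] at h
    rw [List.isChain_cons_cons]
    constructor
    · simp only [Bool.and_eq_true, beq_iff_eq] at hcd
      intro ⟨h1, h2⟩; exact hcd ⟨h1, h2⟩
    · exact ih h
  | case3 l h1 =>
    match l, h1 with
    | [], _ => exact .nil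
    | [c], _ => exact .singleton c
    | c :: d :: t, h1 => exact (h1 c d t rfl).elim

theorem pass_fix_chain (r : List Char) (h : reducePassB r = r) :
    List.IsChain (fun c d => isPairB c d = false) r := by
  rw [reducePassB_rem2] at h
  have a1 := rem2_len '(' ')' r
  have a2 := rem2_len '[' ']' (rem2 '(' ')' r)
  have a3 := rem2_len '{' '}' (rem2 '[' ']' (rem2 '(' ')' r))
  have hlen : r.length ≤ (rem2 '{' '}' (rem2 '[' ']' (rem2 '(' ')' r))).length := by rw [h]
  have e1 : rem2 '(' ')' r = r := by
    rcases rem2_eq_or_lt '(' ')' r with h1 | h1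
    · exact h1
    · omega
  rw [e1] at h a2 a3 hlen
  have e2 : rem2 '[' ']' r = r := by
    rcases rem2_eq_or_lt '[' ']' r with h2 | h2
    · exact h2
    · omega
  rw [e2] at h a3 hlen
  have e3 : rem2 '{' '}' r = r := h
  have c1 := rem2_fix_chain _ _ _ e1
  have c2 := rem2_fix_chain _ _ _ e2
  have c3 := rem2_fix_chain _ _ _ e3
  -- combine the three chains pointwise
  rw [List.isChain_iff_getElem] at c1 c2 c3 ⊢
  intro i hi
  have h1 := c1 i hi
  have h2 := c2 i hi
  have h3 := c3 i hi
  simp only [isPairB, Bool.or_eq_false_iff, Bool.and_eq_false_iff, beq_eq_false_iff_ne, ne_eq]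
  tauto

theorem chain_foldl_stepS (w u : List Char)
    (h : List.IsChain (fun c d => isPairB c d = false) (u ++ w)) :
    List.foldl stepS u.reverse w = (u ++ w).reverse := by
  induction w generalizing u with
  | nil => simp
  | cons c t ih =>
    have hstep : stepS u.reverse c = (u ++ [c]).reverse := by
      rcases hu : u.reverse with _ | ⟨a, rest⟩
      · have hu0 : u = [] := by simpa using congrArg List.reverse hu
        subst hu0; simp [stepS]
      · have hlast : u.getLast? = some a := by
          rw [List.getLast?_eq_head?_reverse, hu]; rfl
        have hfalse : isPairB a c = false := by
          rw [List.isChain_append] at h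
          exact h.2.2 a (by rw [hlast]; rfl) c rfl
        simp [stepS, hfalse, hu]
    rw [List.foldl_cons, hstep]
    have := ih (u ++ [c]) (by simpa using h)
    simpa using this

theorem fixLoopB_fix (fuel : Nat) (r : List Char) (h : r.length < fuel) :
    reducePassB (fixLoopB fuel r) = fixLoopB fuel r := by
  induction fuel generalizing r with
  | zero => omega
  | succ fuel ih =>
    simp only [fixLoopB]
    by_cases hf : reducePassB r = r
    · simp [hf]
    · simp only [hf, if_false]
      exact ih (reducePassB r) (by have := pass_ne_lt r hf; omega)

theorem redS_fixLoopB (fuel : Nat) (r : List Char) : redS (fixLoopB fuel r) = redS r := by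
  induction fuel generalizing r with
  | zero => rfl
  | succ fuel ih =>
    simp only [fixLoopB]
    by_cases hf : reducePassB r = r
    · simp [hf]
    · simp only [hf, if_false]
      rw [ih, redS_pass]

theorem fixLoopB_eq_redS (r : List Char) : fixLoopB (r.length + 1) r = (redS r).reverse := by
  set w := fixLoopB (r.length + 1) r with hw
  have hfix : reducePassB w = w := fixLoopB_fix _ _ (by omega)
  have hchain := pass_fix_chain w hfix
  have hnf : List.foldl stepS ([] : List Char).reverse w = (([] : List Char) ++ w).reverse :=
    chain_foldl_stepS w [] (by simpa using hchain)
  have hred : redS w = w.reverse := by simpa [redS] using hnf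
  have hinv : redS w = redS r := redS_fixLoopB _ _
  rw [← hinv, hred, List.reverse_reverse]

theorem stepA_stepS (st : List Char) (c : Char) : stepA st.reverse c = (stepS st c).reverse := by
  cases st with
  | nil => simp [stepA, stepS]
  | cons a st' =>
    have ht : (a :: st').reverse ++ [c] = st'.reverse ++ [a] ++ [c] := by simp
    have hlen : (st'.reverse ++ [a] ++ [c]).length = st'.length + 2 := by simp
    have hm1 : PySem.List.pyGetD (st'.reverse ++ [a] ++ [c]) (-1) ' ' = c := by
      exact PySem.List.pyGetD_neg_one_append_singleton (st'.reverse ++ [a]) c ' '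
    have hm2 : PySem.List.pyGetD (st'.reverse ++ [a] ++ [c]) (-2) ' ' = a := by
      rw [PySem.List.pyGetD_neg_ofNat _ 2 ' ' (by omega) (by simp)]
      have hidx : (st'.reverse ++ [a] ++ [c]).length - 2 = st'.reverse.length := by simp
      simp only [hidx]
      rw [List.getElem_append_left (by simp), List.getElem_append_right (by simp)]
      simp
    simp only [stepA, ht, hm1, hm2, hlen]
    rw [if_pos (by omega)]
    by_cases hp : isPairB a c = true
    · rw [if_pos (by simpa [isPairB] using hp)]
      have : (st'.reverse ++ [a] ++ [c]).dropLast.dropLast = st'.reverse := by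
        simp
      rw [this]
      simp [stepS, hp]
    · rw [if_neg (by simpa [isPairB] using hp)]
      simp only [Bool.not_eq_true] at hp
      simp [stepS, hp]

theorem foldl_stepA (w : List Char) (st : List Char) :
    List.foldl stepA st.reverse w = (List.foldl stepS st w).reverse := by
  induction w generalizing st with
  | nil => rfl
  | cons c t ih => rw [List.foldl_cons, List.foldl_cons, stepA_stepS, ih]

theorem range_map_getD (cs : List Char) (m : Nat) (h : m ≤ cs.length) :
    (List.range m).map (fun k => cs.getD k ' ') = cs.take m := by
  apply List.ext_getElem (by simp; omega)
  intro i h1 h2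
  simp at h1
  simp [List.getD_eq_getElem?_getD, List.getElem?_eq_getElem (by omega : i < cs.length)]

theorem rot_map (cs : List Char) (x : Int) (hx0 : 0 ≤ x) (hxn : x < (cs.length : Int)) :
    (PySem.List.pyRange x (x + (cs.length : Int)) 1).map
        (fun y => PySem.List.pyGetD cs (PySem.Int.mod y (cs.length : Int)) ' ')
      = cs.drop x.toNat ++ cs.take x.toNat := by
  have hn : (0 : Int) < (cs.length : Int) := by omega
  rw [PySem.List.pyRange_one_append x (cs.length : Int) (x + (cs.length : Int)) (le_of_lt hxn) (by omega)]
  rw [List.map_append]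
  have h1 : (PySem.List.pyRange x (cs.length : Int) 1).map
      (fun y => PySem.List.pyGetD cs (PySem.Int.mod y (cs.length : Int)) ' ')
      = cs.drop x.toNat := by
    rw [List.map_congr_left (g := fun y => PySem.List.pyGetD cs y ' ')]
    · exact PySem.List.map_pyGetD_pyRange' cs ' ' hx0
    · intro y hy
      rw [PySem.List.mem_pyRange_one] at hy
      have : PySem.Int.mod y (cs.length : Int) = y := by
        rw [PySem.Int.mod_eq_emod_of_pos hn]
        exact Int.emod_eq_of_lt (by omega) hy.2
      rw [this]
  have h2 : (PySem.List.pyRange (cs.length : Int) (x + (cs.length : Int)) 1).map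
      (fun y => PySem.List.pyGetD cs (PySem.Int.mod y (cs.length : Int)) ' ')
      = cs.take x.toNat := by
    rw [PySem.List.pyRange_one, List.map_map]
    have hlen : ((x + (cs.length : Int)) - (cs.length : Int)).toNat = x.toNat := by omega
    rw [hlen]
    rw [List.map_congr_left (g := fun k => cs.getD k ' ')]
    · exact range_map_getD cs x.toNat (by omega)
    · intro k hk
      simp only [List.mem_range] at hk
      simp only [Function.comp_apply]
      have hmod : PySem.Int.mod ((cs.length : Int) + (k : Int)) (cs.length : Int) = (k : Int) := by
        rw [PySem.Int.mod_eq_emod_of_pos hn, Int.add_comm, Int.add_emod_right]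
        exact Int.emod_eq_of_lt (by omega) (by omega)
      rw [hmod, PySem.List.pyGetD_natCast]
  rw [h1, h2]

theorem rot_slice (cs : List Char) (x : Int) (hx0 : 0 ≤ x) (hxn : x < (cs.length : Int)) :
    PySem.List.slice (cs ++ cs) (some x) (some (x + (cs.length : Int)))
      = cs.drop x.toNat ++ cs.take x.toNat := by
  rw [PySem.List.slice_toNat (cs ++ cs) hx0 (by omega)]
  have h1 : ((x + (cs.length : Int)).toNat - x.toNat) = cs.length := by omega
  rw [h1]
  rw [List.drop_append_of_le_length (by omega)]
  have h2 : cs.length = (cs.drop x.toNat).length + x.toNat := by simp; omega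
  rw [h2, List.take_append]
  simp

theorem solution_eq_alt (s : String) : solution s = solution_alt s := by
  unfold solution solution_alt
  simp only [PySem.Str.len_eq]
  apply PySem.List.foldl_congr_mem
  intro acc x hx
  rw [PySem.List.mem_pyRange_one] at hx
  obtain ⟨hx0, hxn⟩ := hx
  have hA : (PySem.List.pyRange x (x + (s.toList.length : Int)) 1).foldl
      (fun temp y => stepA temp (PySem.List.pyGetD s.toList (PySem.Int.mod y (s.toList.length : Int)) ' ')) []
      = (redS (s.toList.drop x.toNat ++ s.toList.take x.toNat)).reverse := by
    rw [← List.foldl_map (f := fun y => PySem.List.pyGetD s.toList (PySem.Int.mod y (s.toList.length : Int)) ' ')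
      (g := stepA)]
    rw [rot_map s.toList x hx0 hxn]
    have := foldl_stepA (s.toList.drop x.toNat ++ s.toList.take x.toNat) []
    simpa [redS] using this
  have hB : PySem.List.slice (s.toList ++ s.toList) (some x) (some (x + (s.toList.length : Int)))
      = s.toList.drop x.toNat ++ s.toList.take x.toNat := rot_slice s.toList x hx0 hxn
  simp only [hA, hB, fixLoopB_eq_redS]
  simp [List.length_eq_zero_iff]

-- ===== VERDICT (by name: the statement is the Claim_ definition above) =====
theorem solution_spec : Claim_equal_solution := by
  intro s _
  unfold Spec_solution
  exact solution_eq_alt s
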